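-- pv_equiv track=rewrite | github.com/thebradw/cut-sheet-optimizer | cut_sheet_loader.py | _canonicalize_headers
-- ===== SOURCE A (Python) =====
-- from typing import List
--
-- def _canonicalize_headers(cols: List[str]) -> List[str]:
--     out = []
--     for c in cols:
--         k = c.strip().replace(" ", "_").replace("-", "_")
--         k_up = k.upper()
--         if k_up in {"DIAMETER_IN", "DIAMETER"}:
--             out.append("diameter_in")
--         elif k_up == "MATERIAL":
--             out.append("Material")
--         elif k_up in {"QTY", "QUANTITY"}:
--             out.append("Qty")
--         elif k_up == "LENGTH":
--             out.append("Length")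
--         else:
--             out.append(c.strip())
--     return out
-- ===== SOURCE B (Python) =====
-- from typing import List
--
-- # Canonical header keys (normalized, uppercase) -> output names.
-- _HEADER_KEYS = [
--     ("DIAMETER_IN", "diameter_in"),
--     ("DIAMETER", "diameter_in"),
--     ("MATERIAL", "Material"),
--     ("QTY", "Qty"),
--     ("QUANTITY", "Qty"),
--     ("LENGTH", "Length"),
-- ]
--
--
-- def _build_dfa():
--     """Build a trie-shaped DFA over the canonical keys: delta[state] maps a
--     character to the next state, accept maps a final state to its output."""
--     delta = [{}]
--     accept = {}
--     for key, val in _HEADER_KEYS: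
--         st = 0
--         for ch in key:
--             nxt = delta[st].get(ch)
--             if nxt is None:
--                 nxt = len(delta)
--                 delta[st][ch] = nxt
--                 delta.append({})
--             st = nxt
--         accept[st] = val
--     return delta, accept
--
--
-- _DELTA, _ACCEPT = _build_dfa()
--
--
-- def _match(s):
--     """Run s through the DFA, normalizing each character on the fly
--     (' '/'-' -> '_', lowercase -> uppercase); None if no canonical key matches."""
--     st = 0
--     for ch in s:
--         nst = _DELTA[st].get('_' if ch in ' -' else ch.upper())
--         if nst is None:
--             return None
--         st = nst
--     return _ACCEPT.get(st)
--
--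
-- def _canonicalize_headers(cols: List[str]) -> List[str]:
--     out = []
--     for c in cols:
--         s = c.strip()
--         m = _match(s)
--         out.append(s if m is None else m)
--     return out
-- ===== Notes on version B (the rewrite author's own statement) =====
-- stated objective: alternative
-- what changed: Replaces A's per-header normalize-then-compare if/elif cascade by a trie-shaped DFA built once from the six canonical keys; each stripped header is run through the automaton with characters normalized on the fly (' '/'-' to '_', lowercase to uppercase), and the accept table names the canonical output, falling back to the stripped original on a dead state.
import Mathlib
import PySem

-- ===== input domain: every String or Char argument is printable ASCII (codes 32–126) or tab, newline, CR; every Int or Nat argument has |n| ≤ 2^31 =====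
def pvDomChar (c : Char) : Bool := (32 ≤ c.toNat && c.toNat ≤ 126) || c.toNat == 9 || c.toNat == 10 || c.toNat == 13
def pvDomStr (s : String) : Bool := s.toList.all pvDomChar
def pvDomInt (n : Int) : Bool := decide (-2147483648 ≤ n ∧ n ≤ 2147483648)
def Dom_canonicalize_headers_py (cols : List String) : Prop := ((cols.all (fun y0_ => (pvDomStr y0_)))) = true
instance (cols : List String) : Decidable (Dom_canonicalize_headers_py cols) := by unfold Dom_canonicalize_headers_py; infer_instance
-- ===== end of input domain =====

-- B replaces A's normalize-then-compare if/elif cascade by a trie-shaped DFA built once from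
-- the canonical keys and run over each stripped header, normalizing characters on the fly
-- (alternative algorithm; same O(total input length) cost).

-- ===== PORT A =====
-- loop body of A's 'for c in cols' (out.append(x) = out ++ [x])
def canonStepA (out : List String) (c : String) : List String :=
  let k := PySem.Str.replace (PySem.Str.replace (PySem.Str.strip c) " " "_") "-" "_"
  let k_up := PySem.Str.upper k
  if k_up = "DIAMETER_IN" ∨ k_up = "DIAMETER" then out ++ ["diameter_in"]
  else if k_up = "MATERIAL" then out ++ ["Material"]
  else if k_up = "QTY" ∨ k_up = "QUANTITY" then out ++ ["Qty"]
  else if k_up = "LENGTH" then out ++ ["Length"]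
  else out ++ [PySem.Str.strip c]

def canonicalize_headers_py (cols : List String) : List String :=
  cols.foldl canonStepA []

-- ===== PORT B =====
-- _HEADER_KEYS of Source B
def headerKeys : List (String × String) :=
  [("DIAMETER_IN", "diameter_in"), ("DIAMETER", "diameter_in"), ("MATERIAL", "Material"),
   ("QTY", "Qty"), ("QUANTITY", "Qty"), ("LENGTH", "Length")]

-- inner loop body of _build_dfa ('for ch in key'); state = (delta, st).
-- delta[st] is ported as getD with an empty-dict default: st is always a valid index here.
def buildStep (acc : (List (PySem.Dict Char Nat)) × Nat) (ch : Char) :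
    (List (PySem.Dict Char Nat)) × Nat :=
  match (acc.1.getD acc.2 PySem.Dict.empty).get? ch with
  | some nxt => (acc.1, nxt)
  | none =>
      let nxt := acc.1.length
      ((acc.1.set acc.2 ((acc.1.getD acc.2 PySem.Dict.empty).insert ch nxt)) ++ [PySem.Dict.empty],
       nxt)

-- _build_dfa of Source B: outer loop over the keys
def buildDFA : (List (PySem.Dict Char Nat)) × PySem.Dict Nat String :=
  headerKeys.foldl
    (fun acc kv =>
      let r := kv.1.toList.foldl buildStep (acc.1, 0)
      (r.1, acc.2.insert r.2 kv.2))
    ([PySem.Dict.empty], PySem.Dict.empty)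

def dfaDelta : List (PySem.Dict Char Nat) := buildDFA.1
def dfaAccept : PySem.Dict Nat String := buildDFA.2

-- "'_' if ch in ' -' else ch.upper()"; .upper() on one char is upperChar (exact on ASCII)
def normCh (c : Char) : Char := if c = ' ' ∨ c = '-' then '_' else PySem.Chars.upperChar c

-- the 'for ch in s' loop of _match (early return None on a missing edge)
def runDFA (delta : List (PySem.Dict Char Nat)) : Nat → List Char → Option Nat
  | st, [] => some st
  | st, c :: r =>
    match (delta.getD st PySem.Dict.empty).get? (normCh c) with
    | none => none
    | some st' => runDFA delta st' r

-- body of B's 'for c in cols': s = c.strip(); m = _match(s); s if m is None else m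
def canonElemB (c : String) : String :=
  let s := PySem.Str.strip c
  match runDFA dfaDelta 0 s.toList with
  | none => s
  | some st =>
    match dfaAccept.get? st with
    | none => s
    | some v => v

def canonicalize_headers_py_alt (cols : List String) : List String :=
  cols.foldl (fun out c => out ++ [canonElemB c]) []

-- ===== PRECONDITION & SPEC =====
def Spec_canonicalize_headers_py (cols : List String) (out : List String) : Prop :=
  out = canonicalize_headers_py_alt cols
instance (cols : List String) (out : List String) :
    Decidable (Spec_canonicalize_headers_py cols out) := by
  unfold Spec_canonicalize_headers_py; infer_instance

-- ===== CLAIM =====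
def Claim_equal_canonicalize_headers_py : Prop :=
  ∀ (cols : List String), Dom_canonicalize_headers_py cols →
    Spec_canonicalize_headers_py cols (canonicalize_headers_py cols)

-- ===== LEMMAS AND PROOFS =====
-- literal values of the built DFA (checked by rfl below)
def DELTA : List (PySem.Dict Char Nat) :=
  [PySem.Dict.mk [('D', 1), ('M', 12), ('Q', 20), ('L', 30)],
   PySem.Dict.mk [('I', 2)],
   PySem.Dict.mk [('A', 3)],
   PySem.Dict.mk [('M', 4)],
   PySem.Dict.mk [('E', 5)],
   PySem.Dict.mk [('T', 6)],
   PySem.Dict.mk [('E', 7)],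
   PySem.Dict.mk [('R', 8)],
   PySem.Dict.mk [('_', 9)],
   PySem.Dict.mk [('I', 10)],
   PySem.Dict.mk [('N', 11)],
   PySem.Dict.mk [],
   PySem.Dict.mk [('A', 13)],
   PySem.Dict.mk [('T', 14)],
   PySem.Dict.mk [('E', 15)],
   PySem.Dict.mk [('R', 16)],
   PySem.Dict.mk [('I', 17)],
   PySem.Dict.mk [('A', 18)],
   PySem.Dict.mk [('L', 19)],
   PySem.Dict.mk [],
   PySem.Dict.mk [('T', 21), ('U', 23)],
   PySem.Dict.mk [('Y', 22)],
   PySem.Dict.mk [],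
   PySem.Dict.mk [('A', 24)],
   PySem.Dict.mk [('N', 25)],
   PySem.Dict.mk [('T', 26)],
   PySem.Dict.mk [('I', 27)],
   PySem.Dict.mk [('T', 28)],
   PySem.Dict.mk [('Y', 29)],
   PySem.Dict.mk [],
   PySem.Dict.mk [('E', 31)],
   PySem.Dict.mk [('N', 32)],
   PySem.Dict.mk [('G', 33)],
   PySem.Dict.mk [('T', 34)],
   PySem.Dict.mk [('H', 35)],
   PySem.Dict.mk []]

def ACCEPT : PySem.Dict Nat String := PySem.Dict.mk [(11, "diameter_in"), (8, "diameter_in"), (19, "Material"), (22, "Qty"), (29, "Qty"), (35, "Length")]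

set_option maxRecDepth 100000 in
lemma dfaDelta_eq : dfaDelta = DELTA := by rfl

set_option maxRecDepth 100000 in
lemma dfaAccept_eq : dfaAccept = ACCEPT := by rfl

-- the selection B performs after running the DFA from state st
def resOf (st : Nat) (l : List Char) (d : String) : String :=
  match runDFA DELTA st l with
  | none => d
  | some t =>
    match ACCEPT.get? t with
    | none => d
    | some v => v

-- A's cascade, phrased on the normalized key as a list of chars
def keyChain (m : List Char) (d : String) : String :=
  if m = ['D', 'I', 'A', 'M', 'E', 'T', 'E', 'R', '_', 'I', 'N'] ∨ m = ['D', 'I', 'A', 'M', 'E', 'T', 'E', 'R'] then "diameter_in"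
  else if m = ['M', 'A', 'T', 'E', 'R', 'I', 'A', 'L'] then "Material"
  else if m = ['Q', 'T', 'Y'] ∨ m = ['Q', 'U', 'A', 'N', 'T', 'I', 'T', 'Y'] then "Qty"
  else if m = ['L', 'E', 'N', 'G', 'T', 'H'] then "Length"
  else d

lemma resOf_cons (st : Nat) (c : Char) (r : List Char) (d : String) :
    resOf st (c :: r) d =
      match (DELTA.getD st PySem.Dict.empty).get? (normCh c) with
      | none => d
      | some s' => resOf s' r d := by
  unfold resOf
  rw [runDFA]
  cases (DELTA.getD st PySem.Dict.empty).get? (normCh c) <;> rfl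

-- str.replace with one-character arguments is a character map
lemma go_single (o n : Char) : ∀ (l : List Char) (fuel : Nat) (acc : List Char),
    l.length ≤ fuel →
    PySem.Chars.replace.go [o] [n] fuel l acc
      = acc.reverse ++ l.map (fun c => if c = o then n else c) := by
  intro l
  induction l with
  | nil => intro fuel acc _; cases fuel <;> simp [PySem.Chars.replace.go]
  | cons c t ih =>
      intro fuel acc hf
      cases fuel with
      | zero => simp at hf
      | succ f =>
          simp only [PySem.Chars.replace.go]
          by_cases h : c = o
          · subst h
            simp [List.isPrefixOf, List.reverse_cons, ih f _ (by simpa using hf)]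
          · simp [List.isPrefixOf, h, Ne.symm h, List.reverse_cons, ih f _ (by simpa using hf)]

lemma replace_single (o n : Char) (s : List Char) :
    PySem.Chars.replace s [o] [n] = s.map (fun c => if c = o then n else c) := by
  simp [PySem.Chars.replace, go_single o n s s.length [] le_rfl]

-- A's normalized key, character by character
lemma normKey (s : String) :
    (PySem.Str.upper (PySem.Str.replace (PySem.Str.replace s " " "_") "-" "_")).toList
      = s.toList.map normCh := by
  simp [PySem.Str.upper, PySem.Str.replace, PySem.Chars.upper, replace_single, List.map_map]
  intro c _
  by_cases h1 : c = ' ' <;> by_cases h2 : c = '-' <;> simp [normCh, h1, h2] <;> rfl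

lemma run_35 (l : List Char) (d : String) :
    resOf 35 l d = keyChain (['L', 'E', 'N', 'G', 'T', 'H'] ++ l.map normCh) d := by
  cases l with
  | nil => rfl
  | cons c r =>
      rw [resOf_cons]
      rw [show (DELTA.getD 35 PySem.Dict.empty).get? (normCh c) = none from by
            show (PySem.Dict.mk [] : PySem.Dict Char Nat).get? (normCh c) = none
            simp [PySem.Dict.get?]]
      show d = _
      simp [keyChain]

lemma run_34 (l : List Char) (d : String) :
    resOf 34 l d = keyChain (['L', 'E', 'N', 'G', 'T'] ++ l.map normCh) d := by
  cases l with
  | nil => rfl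
  | cons c r =>
      rw [resOf_cons]
      by_cases h1 : normCh c = 'H'
      · rw [show (DELTA.getD 34 PySem.Dict.empty).get? (normCh c) = some 35 from by rw [h1]; rfl]
        show resOf 35 r d = _
        rw [run_35 r d]
        simp [h1]
      ·
        rw [show (DELTA.getD 34 PySem.Dict.empty).get? (normCh c) = none from by
              show (PySem.Dict.mk [('H', 35)] : PySem.Dict Char Nat).get? (normCh c) = none
              simp [PySem.Dict.get?, Ne.symm h1]]
        show d = _
        simp [keyChain, h1]

lemma run_33 (l : List Char) (d : String) :
    resOf 33 l d = keyChain (['L', 'E', 'N', 'G'] ++ l.map normCh) d := by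
  cases l with
  | nil => rfl
  | cons c r =>
      rw [resOf_cons]
      by_cases h1 : normCh c = 'T'
      · rw [show (DELTA.getD 33 PySem.Dict.empty).get? (normCh c) = some 34 from by rw [h1]; rfl]
        show resOf 34 r d = _
        rw [run_34 r d]
        simp [h1]
      ·
        rw [show (DELTA.getD 33 PySem.Dict.empty).get? (normCh c) = none from by
              show (PySem.Dict.mk [('T', 34)] : PySem.Dict Char Nat).get? (normCh c) = none
              simp [PySem.Dict.get?, Ne.symm h1]]
        show d = _
        simp [keyChain, h1]

lemma run_32 (l : List Char) (d : String) :
    resOf 32 l d = keyChain (['L', 'E', 'N'] ++ l.map normCh) d := by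
  cases l with
  | nil => rfl
  | cons c r =>
      rw [resOf_cons]
      by_cases h1 : normCh c = 'G'
      · rw [show (DELTA.getD 32 PySem.Dict.empty).get? (normCh c) = some 33 from by rw [h1]; rfl]
        show resOf 33 r d = _
        rw [run_33 r d]
        simp [h1]
      ·
        rw [show (DELTA.getD 32 PySem.Dict.empty).get? (normCh c) = none from by
              show (PySem.Dict.mk [('G', 33)] : PySem.Dict Char Nat).get? (normCh c) = none
              simp [PySem.Dict.get?, Ne.symm h1]]
        show d = _
        simp [keyChain, h1]

lemma run_31 (l : List Char) (d : String) :
    resOf 31 l d = keyChain (['L', 'E'] ++ l.map normCh) d := by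
  cases l with
  | nil => rfl
  | cons c r =>
      rw [resOf_cons]
      by_cases h1 : normCh c = 'N'
      · rw [show (DELTA.getD 31 PySem.Dict.empty).get? (normCh c) = some 32 from by rw [h1]; rfl]
        show resOf 32 r d = _
        rw [run_32 r d]
        simp [h1]
      ·
        rw [show (DELTA.getD 31 PySem.Dict.empty).get? (normCh c) = none from by
              show (PySem.Dict.mk [('N', 32)] : PySem.Dict Char Nat).get? (normCh c) = none
              simp [PySem.Dict.get?, Ne.symm h1]]
        show d = _
        simp [keyChain, h1]

lemma run_30 (l : List Char) (d : String) :
    resOf 30 l d = keyChain (['L'] ++ l.map normCh) d := by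
  cases l with
  | nil => rfl
  | cons c r =>
      rw [resOf_cons]
      by_cases h1 : normCh c = 'E'
      · rw [show (DELTA.getD 30 PySem.Dict.empty).get? (normCh c) = some 31 from by rw [h1]; rfl]
        show resOf 31 r d = _
        rw [run_31 r d]
        simp [h1]
      ·
        rw [show (DELTA.getD 30 PySem.Dict.empty).get? (normCh c) = none from by
              show (PySem.Dict.mk [('E', 31)] : PySem.Dict Char Nat).get? (normCh c) = none
              simp [PySem.Dict.get?, Ne.symm h1]]
        show d = _
        simp [keyChain, h1]

lemma run_29 (l : List Char) (d : String) :
    resOf 29 l d = keyChain (['Q', 'U', 'A', 'N', 'T', 'I', 'T', 'Y'] ++ l.map normCh) d := by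
  cases l with
  | nil => rfl
  | cons c r =>
      rw [resOf_cons]
      rw [show (DELTA.getD 29 PySem.Dict.empty).get? (normCh c) = none from by
            show (PySem.Dict.mk [] : PySem.Dict Char Nat).get? (normCh c) = none
            simp [PySem.Dict.get?]]
      show d = _
      simp [keyChain]

lemma run_28 (l : List Char) (d : String) :
    resOf 28 l d = keyChain (['Q', 'U', 'A', 'N', 'T', 'I', 'T'] ++ l.map normCh) d := by
  cases l with
  | nil => rfl
  | cons c r =>
      rw [resOf_cons]
      by_cases h1 : normCh c = 'Y'
      · rw [show (DELTA.getD 28 PySem.Dict.empty).get? (normCh c) = some 29 from by rw [h1]; rfl]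
        show resOf 29 r d = _
        rw [run_29 r d]
        simp [h1]
      ·
        rw [show (DELTA.getD 28 PySem.Dict.empty).get? (normCh c) = none from by
              show (PySem.Dict.mk [('Y', 29)] : PySem.Dict Char Nat).get? (normCh c) = none
              simp [PySem.Dict.get?, Ne.symm h1]]
        show d = _
        simp [keyChain, h1]

lemma run_27 (l : List Char) (d : String) :
    resOf 27 l d = keyChain (['Q', 'U', 'A', 'N', 'T', 'I'] ++ l.map normCh) d := by
  cases l with
  | nil => rfl
  | cons c r =>
      rw [resOf_cons]
      by_cases h1 : normCh c = 'T'
      · rw [show (DELTA.getD 27 PySem.Dict.empty).get? (normCh c) = some 28 from by rw [h1]; rfl]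
        show resOf 28 r d = _
        rw [run_28 r d]
        simp [h1]
      ·
        rw [show (DELTA.getD 27 PySem.Dict.empty).get? (normCh c) = none from by
              show (PySem.Dict.mk [('T', 28)] : PySem.Dict Char Nat).get? (normCh c) = none
              simp [PySem.Dict.get?, Ne.symm h1]]
        show d = _
        simp [keyChain, h1]

lemma run_26 (l : List Char) (d : String) :
    resOf 26 l d = keyChain (['Q', 'U', 'A', 'N', 'T'] ++ l.map normCh) d := by
  cases l with
  | nil => rfl
  | cons c r =>
      rw [resOf_cons]
      by_cases h1 : normCh c = 'I'
      · rw [show (DELTA.getD 26 PySem.Dict.empty).get? (normCh c) = some 27 from by rw [h1]; rfl]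
        show resOf 27 r d = _
        rw [run_27 r d]
        simp [h1]
      ·
        rw [show (DELTA.getD 26 PySem.Dict.empty).get? (normCh c) = none from by
              show (PySem.Dict.mk [('I', 27)] : PySem.Dict Char Nat).get? (normCh c) = none
              simp [PySem.Dict.get?, Ne.symm h1]]
        show d = _
        simp [keyChain, h1]

lemma run_25 (l : List Char) (d : String) :
    resOf 25 l d = keyChain (['Q', 'U', 'A', 'N'] ++ l.map normCh) d := by
  cases l with
  | nil => rfl
  | cons c r =>
      rw [resOf_cons]
      by_cases h1 : normCh c = 'T'
      · rw [show (DELTA.getD 25 PySem.Dict.empty).get? (normCh c) = some 26 from by rw [h1]; rfl]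
        show resOf 26 r d = _
        rw [run_26 r d]
        simp [h1]
      ·
        rw [show (DELTA.getD 25 PySem.Dict.empty).get? (normCh c) = none from by
              show (PySem.Dict.mk [('T', 26)] : PySem.Dict Char Nat).get? (normCh c) = none
              simp [PySem.Dict.get?, Ne.symm h1]]
        show d = _
        simp [keyChain, h1]

lemma run_24 (l : List Char) (d : String) :
    resOf 24 l d = keyChain (['Q', 'U', 'A'] ++ l.map normCh) d := by
  cases l with
  | nil => rfl
  | cons c r =>
      rw [resOf_cons]
      by_cases h1 : normCh c = 'N'
      · rw [show (DELTA.getD 24 PySem.Dict.empty).get? (normCh c) = some 25 from by rw [h1]; rfl]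
        show resOf 25 r d = _
        rw [run_25 r d]
        simp [h1]
      ·
        rw [show (DELTA.getD 24 PySem.Dict.empty).get? (normCh c) = none from by
              show (PySem.Dict.mk [('N', 25)] : PySem.Dict Char Nat).get? (normCh c) = none
              simp [PySem.Dict.get?, Ne.symm h1]]
        show d = _
        simp [keyChain, h1]

lemma run_23 (l : List Char) (d : String) :
    resOf 23 l d = keyChain (['Q', 'U'] ++ l.map normCh) d := by
  cases l with
  | nil => rfl
  | cons c r =>
      rw [resOf_cons]
      by_cases h1 : normCh c = 'A'
      · rw [show (DELTA.getD 23 PySem.Dict.empty).get? (normCh c) = some 24 from by rw [h1]; rfl]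
        show resOf 24 r d = _
        rw [run_24 r d]
        simp [h1]
      ·
        rw [show (DELTA.getD 23 PySem.Dict.empty).get? (normCh c) = none from by
              show (PySem.Dict.mk [('A', 24)] : PySem.Dict Char Nat).get? (normCh c) = none
              simp [PySem.Dict.get?, Ne.symm h1]]
        show d = _
        simp [keyChain, h1]

lemma run_22 (l : List Char) (d : String) :
    resOf 22 l d = keyChain (['Q', 'T', 'Y'] ++ l.map normCh) d := by
  cases l with
  | nil => rfl
  | cons c r =>
      rw [resOf_cons]
      rw [show (DELTA.getD 22 PySem.Dict.empty).get? (normCh c) = none from by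
            show (PySem.Dict.mk [] : PySem.Dict Char Nat).get? (normCh c) = none
            simp [PySem.Dict.get?]]
      show d = _
      simp [keyChain]

lemma run_21 (l : List Char) (d : String) :
    resOf 21 l d = keyChain (['Q', 'T'] ++ l.map normCh) d := by
  cases l with
  | nil => rfl
  | cons c r =>
      rw [resOf_cons]
      by_cases h1 : normCh c = 'Y'
      · rw [show (DELTA.getD 21 PySem.Dict.empty).get? (normCh c) = some 22 from by rw [h1]; rfl]
        show resOf 22 r d = _
        rw [run_22 r d]
        simp [h1]
      ·
        rw [show (DELTA.getD 21 PySem.Dict.empty).get? (normCh c) = none from by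
              show (PySem.Dict.mk [('Y', 22)] : PySem.Dict Char Nat).get? (normCh c) = none
              simp [PySem.Dict.get?, Ne.symm h1]]
        show d = _
        simp [keyChain, h1]

lemma run_20 (l : List Char) (d : String) :
    resOf 20 l d = keyChain (['Q'] ++ l.map normCh) d := by
  cases l with
  | nil => rfl
  | cons c r =>
      rw [resOf_cons]
      by_cases h1 : normCh c = 'T'
      · rw [show (DELTA.getD 20 PySem.Dict.empty).get? (normCh c) = some 21 from by rw [h1]; rfl]
        show resOf 21 r d = _
        rw [run_21 r d]
        simp [h1]
      ·
        by_cases h2 : normCh c = 'U'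
        · rw [show (DELTA.getD 20 PySem.Dict.empty).get? (normCh c) = some 23 from by rw [h2]; rfl]
          show resOf 23 r d = _
          rw [run_23 r d]
          simp [h2]
        ·
          rw [show (DELTA.getD 20 PySem.Dict.empty).get? (normCh c) = none from by
                show (PySem.Dict.mk [('T', 21), ('U', 23)] : PySem.Dict Char Nat).get? (normCh c) = none
                simp [PySem.Dict.get?, Ne.symm h1, Ne.symm h2]]
          show d = _
          simp [keyChain, h1, h2]

lemma run_19 (l : List Char) (d : String) :
    resOf 19 l d = keyChain (['M', 'A', 'T', 'E', 'R', 'I', 'A', 'L'] ++ l.map normCh) d := by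
  cases l with
  | nil => rfl
  | cons c r =>
      rw [resOf_cons]
      rw [show (DELTA.getD 19 PySem.Dict.empty).get? (normCh c) = none from by
            show (PySem.Dict.mk [] : PySem.Dict Char Nat).get? (normCh c) = none
            simp [PySem.Dict.get?]]
      show d = _
      simp [keyChain]

lemma run_18 (l : List Char) (d : String) :
    resOf 18 l d = keyChain (['M', 'A', 'T', 'E', 'R', 'I', 'A'] ++ l.map normCh) d := by
  cases l with
  | nil => rfl
  | cons c r =>
      rw [resOf_cons]
      by_cases h1 : normCh c = 'L'
      · rw [show (DELTA.getD 18 PySem.Dict.empty).get? (normCh c) = some 19 from by rw [h1]; rfl]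
        show resOf 19 r d = _
        rw [run_19 r d]
        simp [h1]
      ·
        rw [show (DELTA.getD 18 PySem.Dict.empty).get? (normCh c) = none from by
              show (PySem.Dict.mk [('L', 19)] : PySem.Dict Char Nat).get? (normCh c) = none
              simp [PySem.Dict.get?, Ne.symm h1]]
        show d = _
        simp [keyChain, h1]

lemma run_17 (l : List Char) (d : String) :
    resOf 17 l d = keyChain (['M', 'A', 'T', 'E', 'R', 'I'] ++ l.map normCh) d := by
  cases l with
  | nil => rfl
  | cons c r =>
      rw [resOf_cons]
      by_cases h1 : normCh c = 'A'
      · rw [show (DELTA.getD 17 PySem.Dict.empty).get? (normCh c) = some 18 from by rw [h1]; rfl]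
        show resOf 18 r d = _
        rw [run_18 r d]
        simp [h1]
      ·
        rw [show (DELTA.getD 17 PySem.Dict.empty).get? (normCh c) = none from by
              show (PySem.Dict.mk [('A', 18)] : PySem.Dict Char Nat).get? (normCh c) = none
              simp [PySem.Dict.get?, Ne.symm h1]]
        show d = _
        simp [keyChain, h1]

lemma run_16 (l : List Char) (d : String) :
    resOf 16 l d = keyChain (['M', 'A', 'T', 'E', 'R'] ++ l.map normCh) d := by
  cases l with
  | nil => rfl
  | cons c r =>
      rw [resOf_cons]
      by_cases h1 : normCh c = 'I'
      · rw [show (DELTA.getD 16 PySem.Dict.empty).get? (normCh c) = some 17 from by rw [h1]; rfl]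
        show resOf 17 r d = _
        rw [run_17 r d]
        simp [h1]
      ·
        rw [show (DELTA.getD 16 PySem.Dict.empty).get? (normCh c) = none from by
              show (PySem.Dict.mk [('I', 17)] : PySem.Dict Char Nat).get? (normCh c) = none
              simp [PySem.Dict.get?, Ne.symm h1]]
        show d = _
        simp [keyChain, h1]

lemma run_15 (l : List Char) (d : String) :
    resOf 15 l d = keyChain (['M', 'A', 'T', 'E'] ++ l.map normCh) d := by
  cases l with
  | nil => rfl
  | cons c r =>
      rw [resOf_cons]
      by_cases h1 : normCh c = 'R'
      · rw [show (DELTA.getD 15 PySem.Dict.empty).get? (normCh c) = some 16 from by rw [h1]; rfl]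
        show resOf 16 r d = _
        rw [run_16 r d]
        simp [h1]
      ·
        rw [show (DELTA.getD 15 PySem.Dict.empty).get? (normCh c) = none from by
              show (PySem.Dict.mk [('R', 16)] : PySem.Dict Char Nat).get? (normCh c) = none
              simp [PySem.Dict.get?, Ne.symm h1]]
        show d = _
        simp [keyChain, h1]

lemma run_14 (l : List Char) (d : String) :
    resOf 14 l d = keyChain (['M', 'A', 'T'] ++ l.map normCh) d := by
  cases l with
  | nil => rfl
  | cons c r =>
      rw [resOf_cons]
      by_cases h1 : normCh c = 'E'
      · rw [show (DELTA.getD 14 PySem.Dict.empty).get? (normCh c) = some 15 from by rw [h1]; rfl]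
        show resOf 15 r d = _
        rw [run_15 r d]
        simp [h1]
      ·
        rw [show (DELTA.getD 14 PySem.Dict.empty).get? (normCh c) = none from by
              show (PySem.Dict.mk [('E', 15)] : PySem.Dict Char Nat).get? (normCh c) = none
              simp [PySem.Dict.get?, Ne.symm h1]]
        show d = _
        simp [keyChain, h1]

lemma run_13 (l : List Char) (d : String) :
    resOf 13 l d = keyChain (['M', 'A'] ++ l.map normCh) d := by
  cases l with
  | nil => rfl
  | cons c r =>
      rw [resOf_cons]
      by_cases h1 : normCh c = 'T'
      · rw [show (DELTA.getD 13 PySem.Dict.empty).get? (normCh c) = some 14 from by rw [h1]; rfl]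
        show resOf 14 r d = _
        rw [run_14 r d]
        simp [h1]
      ·
        rw [show (DELTA.getD 13 PySem.Dict.empty).get? (normCh c) = none from by
              show (PySem.Dict.mk [('T', 14)] : PySem.Dict Char Nat).get? (normCh c) = none
              simp [PySem.Dict.get?, Ne.symm h1]]
        show d = _
        simp [keyChain, h1]

lemma run_12 (l : List Char) (d : String) :
    resOf 12 l d = keyChain (['M'] ++ l.map normCh) d := by
  cases l with
  | nil => rfl
  | cons c r =>
      rw [resOf_cons]
      by_cases h1 : normCh c = 'A'
      · rw [show (DELTA.getD 12 PySem.Dict.empty).get? (normCh c) = some 13 from by rw [h1]; rfl]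
        show resOf 13 r d = _
        rw [run_13 r d]
        simp [h1]
      ·
        rw [show (DELTA.getD 12 PySem.Dict.empty).get? (normCh c) = none from by
              show (PySem.Dict.mk [('A', 13)] : PySem.Dict Char Nat).get? (normCh c) = none
              simp [PySem.Dict.get?, Ne.symm h1]]
        show d = _
        simp [keyChain, h1]

lemma run_11 (l : List Char) (d : String) :
    resOf 11 l d = keyChain (['D', 'I', 'A', 'M', 'E', 'T', 'E', 'R', '_', 'I', 'N'] ++ l.map normCh) d := by
  cases l with
  | nil => rfl
  | cons c r =>
      rw [resOf_cons]
      rw [show (DELTA.getD 11 PySem.Dict.empty).get? (normCh c) = none from by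
            show (PySem.Dict.mk [] : PySem.Dict Char Nat).get? (normCh c) = none
            simp [PySem.Dict.get?]]
      show d = _
      simp [keyChain]

lemma run_10 (l : List Char) (d : String) :
    resOf 10 l d = keyChain (['D', 'I', 'A', 'M', 'E', 'T', 'E', 'R', '_', 'I'] ++ l.map normCh) d := by
  cases l with
  | nil => rfl
  | cons c r =>
      rw [resOf_cons]
      by_cases h1 : normCh c = 'N'
      · rw [show (DELTA.getD 10 PySem.Dict.empty).get? (normCh c) = some 11 from by rw [h1]; rfl]
        show resOf 11 r d = _
        rw [run_11 r d]
        simp [h1]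
      ·
        rw [show (DELTA.getD 10 PySem.Dict.empty).get? (normCh c) = none from by
              show (PySem.Dict.mk [('N', 11)] : PySem.Dict Char Nat).get? (normCh c) = none
              simp [PySem.Dict.get?, Ne.symm h1]]
        show d = _
        simp [keyChain, h1]

lemma run_9 (l : List Char) (d : String) :
    resOf 9 l d = keyChain (['D', 'I', 'A', 'M', 'E', 'T', 'E', 'R', '_'] ++ l.map normCh) d := by
  cases l with
  | nil => rfl
  | cons c r =>
      rw [resOf_cons]
      by_cases h1 : normCh c = 'I'
      · rw [show (DELTA.getD 9 PySem.Dict.empty).get? (normCh c) = some 10 from by rw [h1]; rfl]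
        show resOf 10 r d = _
        rw [run_10 r d]
        simp [h1]
      ·
        rw [show (DELTA.getD 9 PySem.Dict.empty).get? (normCh c) = none from by
              show (PySem.Dict.mk [('I', 10)] : PySem.Dict Char Nat).get? (normCh c) = none
              simp [PySem.Dict.get?, Ne.symm h1]]
        show d = _
        simp [keyChain, h1]

lemma run_8 (l : List Char) (d : String) :
    resOf 8 l d = keyChain (['D', 'I', 'A', 'M', 'E', 'T', 'E', 'R'] ++ l.map normCh) d := by
  cases l with
  | nil => rfl
  | cons c r =>
      rw [resOf_cons]
      by_cases h1 : normCh c = '_'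
      · rw [show (DELTA.getD 8 PySem.Dict.empty).get? (normCh c) = some 9 from by rw [h1]; rfl]
        show resOf 9 r d = _
        rw [run_9 r d]
        simp [h1]
      ·
        rw [show (DELTA.getD 8 PySem.Dict.empty).get? (normCh c) = none from by
              show (PySem.Dict.mk [('_', 9)] : PySem.Dict Char Nat).get? (normCh c) = none
              simp [PySem.Dict.get?, Ne.symm h1]]
        show d = _
        simp [keyChain, h1]

lemma run_7 (l : List Char) (d : String) :
    resOf 7 l d = keyChain (['D', 'I', 'A', 'M', 'E', 'T', 'E'] ++ l.map normCh) d := by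
  cases l with
  | nil => rfl
  | cons c r =>
      rw [resOf_cons]
      by_cases h1 : normCh c = 'R'
      · rw [show (DELTA.getD 7 PySem.Dict.empty).get? (normCh c) = some 8 from by rw [h1]; rfl]
        show resOf 8 r d = _
        rw [run_8 r d]
        simp [h1]
      ·
        rw [show (DELTA.getD 7 PySem.Dict.empty).get? (normCh c) = none from by
              show (PySem.Dict.mk [('R', 8)] : PySem.Dict Char Nat).get? (normCh c) = none
              simp [PySem.Dict.get?, Ne.symm h1]]
        show d = _
        simp [keyChain, h1]

lemma run_6 (l : List Char) (d : String) :
    resOf 6 l d = keyChain (['D', 'I', 'A', 'M', 'E', 'T'] ++ l.map normCh) d := by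
  cases l with
  | nil => rfl
  | cons c r =>
      rw [resOf_cons]
      by_cases h1 : normCh c = 'E'
      · rw [show (DELTA.getD 6 PySem.Dict.empty).get? (normCh c) = some 7 from by rw [h1]; rfl]
        show resOf 7 r d = _
        rw [run_7 r d]
        simp [h1]
      ·
        rw [show (DELTA.getD 6 PySem.Dict.empty).get? (normCh c) = none from by
              show (PySem.Dict.mk [('E', 7)] : PySem.Dict Char Nat).get? (normCh c) = none
              simp [PySem.Dict.get?, Ne.symm h1]]
        show d = _
        simp [keyChain, h1]

lemma run_5 (l : List Char) (d : String) :
    resOf 5 l d = keyChain (['D', 'I', 'A', 'M', 'E'] ++ l.map normCh) d := by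
  cases l with
  | nil => rfl
  | cons c r =>
      rw [resOf_cons]
      by_cases h1 : normCh c = 'T'
      · rw [show (DELTA.getD 5 PySem.Dict.empty).get? (normCh c) = some 6 from by rw [h1]; rfl]
        show resOf 6 r d = _
        rw [run_6 r d]
        simp [h1]
      ·
        rw [show (DELTA.getD 5 PySem.Dict.empty).get? (normCh c) = none from by
              show (PySem.Dict.mk [('T', 6)] : PySem.Dict Char Nat).get? (normCh c) = none
              simp [PySem.Dict.get?, Ne.symm h1]]
        show d = _
        simp [keyChain, h1]

lemma run_4 (l : List Char) (d : String) :
    resOf 4 l d = keyChain (['D', 'I', 'A', 'M'] ++ l.map normCh) d := by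
  cases l with
  | nil => rfl
  | cons c r =>
      rw [resOf_cons]
      by_cases h1 : normCh c = 'E'
      · rw [show (DELTA.getD 4 PySem.Dict.empty).get? (normCh c) = some 5 from by rw [h1]; rfl]
        show resOf 5 r d = _
        rw [run_5 r d]
        simp [h1]
      ·
        rw [show (DELTA.getD 4 PySem.Dict.empty).get? (normCh c) = none from by
              show (PySem.Dict.mk [('E', 5)] : PySem.Dict Char Nat).get? (normCh c) = none
              simp [PySem.Dict.get?, Ne.symm h1]]
        show d = _
        simp [keyChain, h1]

lemma run_3 (l : List Char) (d : String) :
    resOf 3 l d = keyChain (['D', 'I', 'A'] ++ l.map normCh) d := by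
  cases l with
  | nil => rfl
  | cons c r =>
      rw [resOf_cons]
      by_cases h1 : normCh c = 'M'
      · rw [show (DELTA.getD 3 PySem.Dict.empty).get? (normCh c) = some 4 from by rw [h1]; rfl]
        show resOf 4 r d = _
        rw [run_4 r d]
        simp [h1]
      ·
        rw [show (DELTA.getD 3 PySem.Dict.empty).get? (normCh c) = none from by
              show (PySem.Dict.mk [('M', 4)] : PySem.Dict Char Nat).get? (normCh c) = none
              simp [PySem.Dict.get?, Ne.symm h1]]
        show d = _
        simp [keyChain, h1]

lemma run_2 (l : List Char) (d : String) :
    resOf 2 l d = keyChain (['D', 'I'] ++ l.map normCh) d := by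
  cases l with
  | nil => rfl
  | cons c r =>
      rw [resOf_cons]
      by_cases h1 : normCh c = 'A'
      · rw [show (DELTA.getD 2 PySem.Dict.empty).get? (normCh c) = some 3 from by rw [h1]; rfl]
        show resOf 3 r d = _
        rw [run_3 r d]
        simp [h1]
      ·
        rw [show (DELTA.getD 2 PySem.Dict.empty).get? (normCh c) = none from by
              show (PySem.Dict.mk [('A', 3)] : PySem.Dict Char Nat).get? (normCh c) = none
              simp [PySem.Dict.get?, Ne.symm h1]]
        show d = _
        simp [keyChain, h1]

lemma run_1 (l : List Char) (d : String) :
    resOf 1 l d = keyChain (['D'] ++ l.map normCh) d := by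
  cases l with
  | nil => rfl
  | cons c r =>
      rw [resOf_cons]
      by_cases h1 : normCh c = 'I'
      · rw [show (DELTA.getD 1 PySem.Dict.empty).get? (normCh c) = some 2 from by rw [h1]; rfl]
        show resOf 2 r d = _
        rw [run_2 r d]
        simp [h1]
      ·
        rw [show (DELTA.getD 1 PySem.Dict.empty).get? (normCh c) = none from by
              show (PySem.Dict.mk [('I', 2)] : PySem.Dict Char Nat).get? (normCh c) = none
              simp [PySem.Dict.get?, Ne.symm h1]]
        show d = _
        simp [keyChain, h1]

lemma run_0 (l : List Char) (d : String) :
    resOf 0 l d = keyChain ([] ++ l.map normCh) d := by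
  cases l with
  | nil => rfl
  | cons c r =>
      rw [resOf_cons]
      by_cases h1 : normCh c = 'D'
      · rw [show (DELTA.getD 0 PySem.Dict.empty).get? (normCh c) = some 1 from by rw [h1]; rfl]
        show resOf 1 r d = _
        rw [run_1 r d]
        simp [h1]
      ·
        by_cases h2 : normCh c = 'M'
        · rw [show (DELTA.getD 0 PySem.Dict.empty).get? (normCh c) = some 12 from by rw [h2]; rfl]
          show resOf 12 r d = _
          rw [run_12 r d]
          simp [h2]
        ·
          by_cases h3 : normCh c = 'Q'
          · rw [show (DELTA.getD 0 PySem.Dict.empty).get? (normCh c) = some 20 from by rw [h3]; rfl]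
            show resOf 20 r d = _
            rw [run_20 r d]
            simp [h3]
          ·
            by_cases h4 : normCh c = 'L'
            · rw [show (DELTA.getD 0 PySem.Dict.empty).get? (normCh c) = some 30 from by rw [h4]; rfl]
              show resOf 30 r d = _
              rw [run_30 r d]
              simp [h4]
            ·
              rw [show (DELTA.getD 0 PySem.Dict.empty).get? (normCh c) = none from by
                    show (PySem.Dict.mk [('D', 1), ('M', 12), ('Q', 20), ('L', 30)] : PySem.Dict Char Nat).get? (normCh c) = none
                    simp [PySem.Dict.get?, Ne.symm h1, Ne.symm h2, Ne.symm h3, Ne.symm h4]]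
              show d = _
              simp [keyChain, h1, h2, h3, h4]

lemma elemB_eq (c : String) :
    canonElemB c
      = keyChain ((PySem.Str.strip c).toList.map normCh) (PySem.Str.strip c) := by
  have h := run_0 (PySem.Str.strip c).toList (PySem.Str.strip c)
  simpa [canonElemB, resOf, dfaDelta_eq, dfaAccept_eq] using h

lemma toListDIN : ("DIAMETER_IN" : String).toList = ['D', 'I', 'A', 'M', 'E', 'T', 'E', 'R', '_', 'I', 'N'] := rfl
lemma toListD : ("DIAMETER" : String).toList = ['D', 'I', 'A', 'M', 'E', 'T', 'E', 'R'] := rfl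
lemma toListM : ("MATERIAL" : String).toList = ['M', 'A', 'T', 'E', 'R', 'I', 'A', 'L'] := rfl
lemma toListQ : ("QTY" : String).toList = ['Q', 'T', 'Y'] := rfl
lemma toListQU : ("QUANTITY" : String).toList = ['Q', 'U', 'A', 'N', 'T', 'I', 'T', 'Y'] := rfl
lemma toListL : ("LENGTH" : String).toList = ['L', 'E', 'N', 'G', 'T', 'H'] := rfl

lemma step_eq (out : List String) (c : String) :
    canonStepA out c = out ++ [canonElemB c] := by
  rw [elemB_eq, ← normKey (PySem.Str.strip c)]
  unfold canonStepA keyChain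
  simp only [← String.toList_inj, toListDIN, toListD, toListM, toListQ, toListQU, toListL]
  split_ifs <;> rfl

-- ===== VERDICT =====
theorem canonicalize_headers_py_spec : Claim_equal_canonicalize_headers_py := by
  intro cols _
  show canonicalize_headers_py cols = canonicalize_headers_py_alt cols
  unfold canonicalize_headers_py canonicalize_headers_py_alt
  rw [show canonStepA = (fun out c => out ++ [canonElemB c]) from
    funext fun out => funext fun c => step_eq out c]
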